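-- pv_equiv track=rewrite | github.com/Hanna3011/Advent_of_code | day7_part1.py | read_catalogs
-- ===== SOURCE A (Python) =====
-- def read_catalogs(information_list):
--     catalogs = {}
--     n_line = 0
--     for command in information_list:
--         if command != "$ cd ..\n":
--             if "$ cd" in command:
--                 direction = "dir " + command[5:-1]
--                 contents = []
--                 for line in information_list[n_line+2:]:
--                     if "$" not in line:
--                         contents.append(line[:-1])
--                     else:
--                         break
--                 catalogs[direction] = contents
--         n_line += 1
--     return catalogs
-- ===== SOURCE B (Python) =====
-- def read_catalogs(information_list):
--     n = len(information_list)
--     # nxt[i] = first index >= i whose line contains "$" (n if none)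
--     nxt = [n] * (n + 1)
--     for i in range(n - 1, -1, -1):
--         if "$" in information_list[i]:
--             nxt[i] = i
--         else:
--             nxt[i] = nxt[i + 1]
--     stripped = [line[:-1] for line in information_list]
--     catalogs = {}
--     for i, command in enumerate(information_list):
--         if command != "$ cd ..\n" and "$ cd" in command:
--             j = min(i + 2, n)
--             catalogs["dir " + command[5:-1]] = stripped[j:nxt[j]]
--     return catalogs
-- ===== Notes on version B (the rewrite author's own statement) =====
-- stated objective: alternative
-- what changed: Replaces A's nested forward rescan for each cd command by a backward pass precomputing, for every position, the index of the next line containing '$', plus one stripped copy of the lines, so each cd's contents become a single slice; trades A's cheap cd-sparse pass for scan-free lookups when cd lines are dense.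
import Mathlib
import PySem

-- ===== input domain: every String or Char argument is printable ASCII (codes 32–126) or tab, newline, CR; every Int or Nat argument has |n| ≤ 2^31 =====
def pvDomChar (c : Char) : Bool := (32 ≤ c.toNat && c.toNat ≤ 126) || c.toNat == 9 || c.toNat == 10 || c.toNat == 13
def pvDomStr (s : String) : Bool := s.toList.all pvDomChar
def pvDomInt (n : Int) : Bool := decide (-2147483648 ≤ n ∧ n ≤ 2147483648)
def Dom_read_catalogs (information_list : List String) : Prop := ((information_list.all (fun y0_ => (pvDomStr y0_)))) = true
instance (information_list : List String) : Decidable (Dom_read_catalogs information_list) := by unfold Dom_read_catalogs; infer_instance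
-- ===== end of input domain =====

-- B replaces A's nested rescan per cd command by a precomputed next-'$' index plus one stripped copy, each cd's contents becoming a single slice (alternative algorithm, not claimed faster).

-- ===== PORT A =====
-- A's inner loop: for line in rest: if "$" not in line: append line[:-1] else break
def readCatContents : List String → List String
  | [] => []
  | line :: rest =>
    if PySem.Str.isIn "$" line then []
    else PySem.Str.slice line none (some (-1)) :: readCatContents rest

-- A's loop body, with the whole list captured for the inner scan (state = (catalogs, n_line))
def readCatStepA (full : List String) (st : PySem.Dict String (List String) × Int)
    (command : String) : PySem.Dict String (List String) × Int :=
  let catalogs :=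
    if command ≠ "$ cd ..\n" then
      if PySem.Str.isIn "$ cd" command then
        let direction := "dir " ++ PySem.Str.slice command (some 5) (some (-1))
        let contents := readCatContents (PySem.List.slice full (some (st.2 + 2)) none)
        st.1.insert direction contents
      else st.1
    else st.1
  (catalogs, st.2 + 1)

def read_catalogs (information_list : List String) : List (String × List String) :=
  (information_list.foldl (readCatStepA information_list) (PySem.Dict.empty, 0)).1.items

-- ===== PORT B =====
-- Source B's backward loop: nxtList xs i0 = the array nxt for xs viewed at absolute offset i0
-- (nxt[k] = first absolute index ≥ i0+k whose line contains "$"; i0+len(xs) if none); length len(xs)+1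
def nxtList : List String → Nat → List Nat
  | [], i0 => [i0]
  | line :: rest, i0 =>
    let r := nxtList rest (i0 + 1)
    (if PySem.Str.isIn "$" line then i0 else r.headD (i0 + 1)) :: r

-- Source B's second loop body (nxt, stripped and n precomputed)
def readCatStepB (nxt : List Nat) (stripped : List String) (n : Nat)
    (catalogs : PySem.Dict String (List String)) (p : Int × String) :
    PySem.Dict String (List String) :=
  if p.2 ≠ "$ cd ..\n" ∧ PySem.Str.isIn "$ cd" p.2 then
    let j := min (p.1 + 2).toNat n
    catalogs.insert ("dir " ++ PySem.Str.slice p.2 (some 5) (some (-1)))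
      (PySem.List.slice stripped (some (j : Int)) (some ((nxt.getD j n : Nat) : Int)))
  else catalogs

def read_catalogs_alt (information_list : List String) : List (String × List String) :=
  let n := information_list.length
  let nxt := nxtList information_list 0
  let stripped := information_list.map (fun line => PySem.Str.slice line none (some (-1)))
  ((PySem.List.enumerate information_list 0).foldl (readCatStepB nxt stripped n)
    PySem.Dict.empty).items

-- ===== PRECONDITION & SPEC =====
def Spec_read_catalogs (information_list : List String) (out : List (String × List String)) : Prop := out = read_catalogs_alt information_list
instance (information_list : List String) (out : List (String × List String)) : Decidable (Spec_read_catalogs information_list out) := by unfold Spec_read_catalogs; infer_instance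

-- ===== CLAIM (what is proved, stated in full; the proofs are below) =====
def Claim_equal_read_catalogs : Prop := ∀ (information_list : List String), Dom_read_catalogs information_list → Spec_read_catalogs information_list (read_catalogs information_list)

-- ===== LEMMAS AND PROOFS =====

-- nxt[k] - k is the length of the "$"-free run starting at position k
-- takeWhile is the prefix of its own length (no Mathlib name found for this exact form)
lemma take_length_takeWhile' (p : String → Bool) (ys : List String) :
    ys.take (ys.takeWhile p).length = ys.takeWhile p := by
  induction ys with
  | nil => simp
  | cons a l ih => by_cases h : p a <;> simp [h, ih]

lemma nxtList_getD (xs : List String) (i0 k : Nat) (d : Nat) (hk : k ≤ xs.length) :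
    (nxtList xs i0).getD k d
      = i0 + k + ((xs.drop k).takeWhile (fun l => !PySem.Str.isIn "$" l)).length := by
  induction xs generalizing i0 k d with
  | nil =>
    have hk0 : k = 0 := Nat.le_zero.mp hk
    subst hk0
    simp [nxtList, List.getD]
  | cons line rest ih =>
    cases k with
    | zero =>
      simp only [nxtList, List.getD_cons_zero, List.drop_zero, List.takeWhile_cons]
      cases hb : PySem.Str.isIn "$" line with
      | true => simp
      | false =>
        have h0 := ih (i0 + 1) 0 (i0 + 1) (Nat.zero_le _)
        simp only [List.drop_zero] at h0
        have hh : (nxtList rest (i0 + 1)).headD (i0 + 1)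
            = (nxtList rest (i0 + 1)).getD 0 (i0 + 1) := by
          cases nxtList rest (i0 + 1) <;> simp [List.getD]
        simp only [Bool.not_false, if_true]
        rw [hh, h0]
        simp
        omega
    | succ k' =>
      simp only [nxtList, List.getD_cons_succ, List.drop_succ_cons]
      rw [ih (i0 + 1) k' d (by simpa using hk)]
      omega

-- A's inner scan is "strip each line of the leading '$'-free run"
lemma readCatContents_eq (ys : List String) :
    readCatContents ys
      = (ys.takeWhile (fun l => !PySem.Str.isIn "$" l)).map
          (fun line => PySem.Str.slice line none (some (-1))) := by
  induction ys with
  | nil => simp [readCatContents]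
  | cons line rest ih =>
    simp only [readCatContents, List.takeWhile_cons]
    cases hb : PySem.Str.isIn "$" line with
    | true => simp
    | false => simp only [Bool.not_false, if_true, Bool.false_eq_true, if_false, List.map_cons, ih]

-- B's slice of the stripped copy equals A's scan of the original suffix
lemma slice_stripped_eq (xs : List String) (j : Nat) (hj : j ≤ xs.length) :
    PySem.List.slice (xs.map (fun line => PySem.Str.slice line none (some (-1))))
        (some (j : Int))
        (some (((nxtList xs 0).getD j xs.length : Nat) : Int))
      = readCatContents (xs.drop j) := by
  rw [nxtList_getD xs 0 j _ hj, PySem.List.slice_natCast, readCatContents_eq]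
  rw [← List.map_drop]
  have h1 : (0 + j + ((xs.drop j).takeWhile (fun l => !PySem.Str.isIn "$" l)).length) - j
      = ((xs.drop j).takeWhile (fun l => !PySem.Str.isIn "$" l)).length := by omega
  rw [h1, ← List.map_take, take_length_takeWhile']

-- the two loop bodies agree step by step (A's counter = B's enumerate index)
lemma fold_agree (full : List String) (xs : List String) (k : Nat)
    (d : PySem.Dict String (List String)) :
    (xs.foldl (readCatStepA full) (d, (k : Int))).1
      = (PySem.List.enumerate xs (k : Int)).foldl
          (readCatStepB (nxtList full 0)
            (full.map (fun line => PySem.Str.slice line none (some (-1)))) full.length) d := by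
  induction xs generalizing k d with
  | nil => simp [PySem.List.enumerate]
  | cons x xs ih =>
    rw [List.foldl_cons, PySem.List.enumerate_cons, List.foldl_cons]
    have hstep : readCatStepA full (d, (k : Int)) x
        = (readCatStepB (nxtList full 0)
            (full.map (fun line => PySem.Str.slice line none (some (-1)))) full.length
            d ((k : Int), x), ((k : Int) + 1)) := by
      unfold readCatStepA readCatStepB
      by_cases h1 : x = "$ cd ..\n"
      · simp [h1]
      · by_cases h2 : PySem.Str.isIn "$ cd" x
        · have hk2 : ((k : Int) + 2) = ((k + 2 : Nat) : Int) := by push_cast; ring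
          simp only [h1, h2, if_pos, ne_eq, not_false_iff, and_self]
          rw [hk2, PySem.List.slice_from_natCast]
          simp only [Int.toNat_natCast]
          have hdrop : full.drop (k + 2) = full.drop (min (k + 2) full.length) := by
            rcases Nat.le_total (k + 2) full.length with h | h
            · rw [Nat.min_eq_left h]
            · rw [Nat.min_eq_right h, List.drop_of_length_le h,
                List.drop_of_length_le (Nat.le_refl _)]
          rw [hdrop, ← slice_stripped_eq full (min (k + 2) full.length) (Nat.min_le_right _ _)]
        · simp only [PySem.Str.isIn_eq, show ("$ cd").toList = ['$', ' ', 'c', 'd'] from rfl] at h2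
          simp [h1, h2]
    rw [hstep]
    have : ((k : Int) + 1) = ((k + 1 : Nat) : Int) := by push_cast; ring
    rw [this, ih]

-- ===== VERDICT (by name: the statement is the Claim_ definition above) =====
theorem read_catalogs_spec : Claim_equal_read_catalogs := by
  intro xs _
  unfold Spec_read_catalogs read_catalogs read_catalogs_alt
  have h := fold_agree xs xs 0 PySem.Dict.empty
  simpa using congrArg PySem.Dict.items h
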